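-- pv_equiv track=rewrite | github.com/ChitturiSaiSuman/Competitive_Programming | Codechef/DEC20B/test.py | check
-- ===== SOURCE A (Python) =====
-- def check(l,n,k):
--     count = 0
--     for i in range(2**n):
--         temp = []
--         b = bin(i)[2:]
--         if b.count("1") != k:
--             continue
--         b = "0"*(n-len(b)) + b
--         for bit in range(n):
--             if b[bit] == '1':
--                 temp.append(l[bit])
--         if sum(temp)>0:
--             count += 1
--     return count == 1
-- ===== SOURCE B (Python) =====
-- def check(l, n, k):
--     # Count, by choose/skip recursion with size pruning, the k-subsets of
--     # l[:n] whose sum is positive; A enumerates all 2**n bitmask strings.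
--     def cnt(items, k, s):
--         # number of ways to choose k elements from items with s + their sum > 0
--         if k <= 0:
--             return 1 if (k == 0 and s > 0) else 0
--         if k > len(items):
--             return 0
--         rest = items[1:]
--         return cnt(rest, k, s) + cnt(rest, k - 1, s + items[0])
--     return cnt(l[:n], k, 0) == 1
-- ===== Notes on version B (the rewrite author's own statement) =====
-- stated objective: alternative
-- what changed: A enumerates all 2**n bitmask integers, builds each one's padded binary string and rescans it against l to collect the subset; B counts positive-sum k-subsets by a choose/skip recursion over l[:n] with a running sum, pruning every branch where the size bound (k < 0 or k > len(rest)) makes a k-subset impossible, so no binary strings are built and only feasible subsets are visited (much cheaper when k is far from n/2, same exponential worst case at k ~ n/2).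
-- outside the precondition, e.g. on check([], 1, 0): A returns False, B returns False; on check([1], 3, 4): A returns False, B returns False; on check([], 1, 1): A raises IndexError, B returns False
-- crash fix: A raises TypeError when n < 0 (range(2**n) on a float) and IndexError when len(l) < n and 1 <= k <= n (a size-k bitmask selects an index beyond l); B returns a Bool (False on the witness) in both cases. — e.g. on check([], 1, 1): A raises IndexError, B returns false
import Mathlib
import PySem

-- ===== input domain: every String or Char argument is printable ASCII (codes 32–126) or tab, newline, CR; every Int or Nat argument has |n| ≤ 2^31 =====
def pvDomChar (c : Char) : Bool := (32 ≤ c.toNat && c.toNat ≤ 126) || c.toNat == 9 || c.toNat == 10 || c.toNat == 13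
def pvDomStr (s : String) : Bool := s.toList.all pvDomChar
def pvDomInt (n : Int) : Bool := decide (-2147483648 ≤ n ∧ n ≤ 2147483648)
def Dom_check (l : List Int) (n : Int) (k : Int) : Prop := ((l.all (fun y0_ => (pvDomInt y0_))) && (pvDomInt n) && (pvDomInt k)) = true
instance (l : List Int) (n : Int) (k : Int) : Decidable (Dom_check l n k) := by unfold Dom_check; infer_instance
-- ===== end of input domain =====

-- B replaces A's scan of all 2**n binary strings by a choose/skip recursion over the
-- list that prunes on the subset size bound; equivalence of the RETURN value is proved
-- on Pre_check (0 ≤ n ≤ len l, i.e. where A cannot raise).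

-- ===== PORT A =====
-- bin(i)[2:] is PySem.Int.toBinChars; "0"*(n-len(b)) is List.replicate with Python's
-- clamping of a negative repeat count ((…).toNat); b[bit] / l[bit] are pyGetD, exact
-- inside Pre_check where every index is in range (Python would raise otherwise).
-- 2**n is 2 ^ n.toNat: inside Pre_check 0 ≤ n (Python raises TypeError on n < 0).
def check (l : List Int) (n : Int) (k : Int) : Bool :=
  let count : Int :=
    (PySem.List.pyRange 0 (2 ^ n.toNat) 1).foldl
      (fun count i =>
        let b := PySem.Int.toBinChars i
        if (PySem.Chars.count b ['1'] : Int) ≠ k then count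
        else
          let b2 := List.replicate ((n - (b.length : Int)).toNat) '0' ++ b
          let temp :=
            (PySem.List.pyRange 0 n 1).foldl
              (fun temp bit =>
                if PySem.List.pyGetD b2 bit ' ' = '1' then temp ++ [PySem.List.pyGetD l bit 0]
                else temp)
              ([] : List Int)
          if temp.sum > 0 then count + 1 else count)
      0
  count == 1

-- ===== PORT B =====
-- cnt(items, k, s) of Source B: choose/skip recursion with the k ≤ 0 / k > len(items) guards.
def cntAlt : List Int → Int → Int → Int
  | [], k, s => if k = 0 ∧ s > 0 then 1 else 0
  | x :: xs, k, s =>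
    if k ≤ 0 then (if k = 0 ∧ s > 0 then 1 else 0)
    else if k > ((x :: xs).length : Int) then 0
    else cntAlt xs k s + cntAlt xs (k - 1) (s + x)

def check_alt (l : List Int) (n : Int) (k : Int) : Bool :=
  cntAlt (PySem.List.slice l none (some n)) k 0 == 1

-- ===== PRECONDITION & SPEC =====
-- Pre_check excludes n < 0 (A raises TypeError at range(2**n)) and n > len(l) (A raises
-- IndexError at l[bit] whenever 1 ≤ k ≤ n; in the remaining corner k ≤ 0 or k > n of that
-- region A happens to return False, as B does — see claim.json cites).
def Pre_check (l : List Int) (n : Int) (k : Int) : Prop := 0 ≤ n ∧ n ≤ l.length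
instance (l : List Int) (n : Int) (k : Int) : Decidable (Pre_check l n k) := by unfold Pre_check; infer_instance
def pvWitness_check : List Int × Int × Int := ([1, -2], 2, 1)

-- A raises on n < 0 (TypeError at range(2**n)) and on len(l) < n with 1 ≤ k ≤ n
-- (IndexError: some size-k bitmask selects an index ≥ len(l)); B returns a Bool there
-- (False at the witness: no size-k subset of l[:n] exists at all).
def Raises_check (l : List Int) (n : Int) (k : Int) : Prop :=
  n < 0 ∨ ((l.length : Int) < n ∧ 1 ≤ k ∧ k ≤ n)
instance (l : List Int) (n : Int) (k : Int) : Decidable (Raises_check l n k) := by unfold Raises_check; infer_instance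
def pvRaiseWitness_check : List Int × Int × Int := ([], 1, 1)
def pvRaiseWitnessOut_check : Bool := false

def Spec_check (l : List Int) (n : Int) (k : Int) (out : Bool) : Prop := out = check_alt l n k
instance (l : List Int) (n : Int) (k : Int) (out : Bool) : Decidable (Spec_check l n k out) := by unfold Spec_check; infer_instance

-- ===== CLAIM (what is proved, stated in full; the proofs are below) =====
def Claim_equal_check : Prop := ∀ (l : List Int) (n : Int) (k : Int), Dom_check l n k → Pre_check l n k → Spec_check l n k (check l n k)
def Claim_raises_check : Prop := (∀ (l : List Int) (n : Int) (k : Int), Dom_check l n k → Raises_check l n k → ¬ Pre_check l n k) ∧ (Dom_check (pvRaiseWitness_check.1) (pvRaiseWitness_check.2.1) (pvRaiseWitness_check.2.2) ∧ Raises_check (pvRaiseWitness_check.1) (pvRaiseWitness_check.2.1) (pvRaiseWitness_check.2.2) ∧ check_alt (pvRaiseWitness_check.1) (pvRaiseWitness_check.2.1) (pvRaiseWitness_check.2.2) = pvRaiseWitnessOut_check)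

-- ===== LEMMAS AND PROOFS =====

-- binary digits of j, MSB first, empty for 0 (bin(j)[2:] is binStr below)
def binRec (j : Nat) : List Char :=
  if h : j = 0 then []
  else binRec (j / 2) ++ [if j % 2 = 1 then '1' else '0']
decreasing_by exact Nat.div_lt_self (Nat.pos_of_ne_zero h) one_lt_two

def binStr (j : Nat) : List Char := if j = 0 then ['0'] else binRec j

-- binary digits of j < 2^m, zero-padded to exactly m characters, MSB first
def bits : Nat → Nat → List Char
  | 0, _ => []
  | m + 1, j => (if 2 ^ m ≤ j then '1' else '0') :: bits m (j % 2 ^ m)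

-- the sublist of items selected by the m-bit pattern of j (MSB ↔ head)
def sel : List Int → Nat → List Int
  | [], _ => []
  | x :: xs, j => if 2 ^ xs.length ≤ j then x :: sel xs (j - 2 ^ xs.length) else sel xs j

-- the sublist of xs at positions whose char is '1'
def selC (cs : List Char) (xs : List Int) : List Int :=
  (cs.zip xs).filterMap (fun p => if p.1 = '1' then some p.2 else none)

def padBin (m j : Nat) : List Char := List.replicate (m - (binStr j).length) '0' ++ binStr j

theorem toDigitsCore_eq : ∀ (f j : Nat) (ds : List Char), j < f →
    Nat.toDigitsCore 2 f j ds = binStr j ++ ds := by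
  intro f
  induction f with
  | zero => intro j ds h; omega
  | succ f ih =>
    intro j ds h
    rw [Nat.toDigitsCore]
    by_cases hq : j / 2 = 0
    · have : j = 0 ∨ j = 1 := by omega
      rcases this with rfl | rfl <;> simp [binStr, binRec] <;> rfl
    · have hj2 : j ≥ 2 := by omega
      simp only [hq]
      rw [ih (j / 2) _ (by omega)]
      have hb : binStr j = binRec (j / 2) ++ [if j % 2 = 1 then '1' else '0'] := by
        rw [binStr, if_neg (by omega : ¬ j = 0), binRec, dif_neg (by omega : ¬ j = 0)]
      rw [hb, binStr, if_neg hq]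
      have : Nat.digitChar (j % 2) = (if j % 2 = 1 then '1' else '0') := by
        rcases Nat.mod_two_eq_zero_or_one j with h2 | h2 <;> rw [h2] <;> rfl
      simp [this]

theorem toBinChars_natCast (j : Nat) : PySem.Int.toBinChars (j : Int) = binStr j := by
  rw [PySem.Int.toBinChars, if_neg (by omega : ¬ (j : Int) < 0)]
  have : ((j : Int)).toNat = j := Int.toNat_natCast j
  rw [this, Nat.toDigits, toDigitsCore_eq _ _ _ (by omega), List.append_nil]

theorem binRec_one : binRec 1 = ['1'] := by
  rw [binRec]; simp [binRec]

theorem padBin_succ_div (m j : Nat) (hm : 1 ≤ m) (hj : j < 2 ^ (m + 1)) :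
    padBin (m + 1) j = padBin m (j / 2) ++ [if j % 2 = 1 then '1' else '0'] := by
  obtain ⟨m', rfl⟩ : ∃ m', m = m' + 1 := ⟨m - 1, by omega⟩
  by_cases hj0 : j = 0
  · subst hj0
    simp [padBin, binStr, List.replicate_succ']
  · by_cases hj1 : j = 1
    · subst hj1
      simp [padBin, binStr, binRec_one, List.replicate_succ']
    · have hq0 : ¬ j / 2 = 0 := by omega
      have hb : binStr j = binRec (j / 2) ++ [if j % 2 = 1 then '1' else '0'] := by
        rw [binStr, if_neg hj0, binRec, dif_neg hj0]
      have hb2 : binStr (j / 2) = binRec (j / 2) := by rw [binStr, if_neg hq0]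
      simp only [padBin, hb, hb2, List.length_append, List.length_cons,
        List.length_nil, List.append_assoc]
      have : m' + 1 + 1 - ((binRec (j / 2)).length + 0 + 1) = m' + 1 - (binRec (j / 2)).length := by
        omega
      rw [this]

theorem bits_succ_div : ∀ (m j : Nat), j < 2 ^ (m + 1) →
    bits (m + 1) j = bits m (j / 2) ++ [if j % 2 = 1 then '1' else '0'] := by
  intro m
  induction m with
  | zero => intro j hj; interval_cases j <;> rfl
  | succ m ih =>
    intro j hj
    have hmod : j % 2 ^ (m + 1) < 2 ^ (m + 1) := Nat.mod_lt _ (by positivity)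
    have e1 : (2 ^ (m + 1) ≤ j) = (2 ^ m ≤ j / 2) := by
      rw [eq_iff_iff, Nat.le_div_iff_mul_le (by norm_num : 0 < 2), pow_succ]
    have e2 : (j % 2 ^ (m + 1)) / 2 = (j / 2) % 2 ^ m := by
      rw [show (2:Nat) ^ (m + 1) = 2 * 2 ^ m by ring]
      exact Nat.mod_mul_right_div_self j 2 (2 ^ m)
    have e3 : (j % 2 ^ (m + 1)) % 2 = j % 2 := Nat.mod_mod_of_dvd j (dvd_pow_self 2 (by omega))
    show (if 2 ^ (m + 1) ≤ j then '1' else '0') :: bits (m + 1) (j % 2 ^ (m + 1)) = _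
    rw [ih _ hmod, e2, e3]
    show _ = ((if 2 ^ m ≤ j / 2 then '1' else '0') :: bits m (j / 2 % 2 ^ m)) ++ _
    simp only [e1, List.cons_append]

theorem padBin_eq_bits : ∀ (m j : Nat), 1 ≤ m → j < 2 ^ m → padBin m j = bits m j := by
  intro m
  induction m with
  | zero => omega
  | succ m ih =>
    intro j _ hj
    by_cases hm : m = 0
    · subst hm
      interval_cases j <;> simp [padBin, binStr, bits, binRec_one]
    · have hm1 : 1 ≤ m := by omega
      have hdiv : j / 2 < 2 ^ m := Nat.div_lt_of_lt_mul (by rw [show 2 * 2 ^ m = 2 ^ (m + 1) by ring]; exact hj)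
      rw [padBin_succ_div m j hm1 hj, bits_succ_div m j hj, ih (j / 2) hm1 hdiv]

theorem count_go_one : ∀ (f : Nat) (cs : List Char) (acc : Nat), cs.length ≤ f →
    PySem.Chars.count.go ['1'] f cs acc = acc + cs.count '1' := by
  intro f
  induction f with
  | zero =>
    intro cs acc h
    have : cs = [] := by cases cs <;> simp_all
    subst this
    simp [PySem.Chars.count.go]
  | succ f ih =>
    intro cs acc h
    cases cs with
    | nil => simp [PySem.Chars.count.go]
    | cons c t =>
      rw [PySem.Chars.count.go]
      by_cases hc : c = '1'
      · subst hc
        rw [if_pos (by simp [List.isPrefixOf])]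
        simp only [List.length_nil, List.length_cons, Nat.zero_add, List.drop_succ_cons,
          List.drop_zero]
        rw [ih t (acc + 1) (by simpa using h), List.count_cons]
        simp
        omega
      · rw [if_neg (by simp [List.isPrefixOf]; exact fun h' => hc h'.symm)]
        rw [ih t acc (by simpa using h), List.count_cons]
        simp [hc]

theorem count_one (cs : List Char) : PySem.Chars.count cs ['1'] = cs.count '1' := by
  rw [PySem.Chars.count, if_neg (by simp)]
  rw [count_go_one cs.length cs 0 le_rfl]
  omega

theorem sel_length_le : ∀ (items : List Int) (j : Nat), (sel items j).length ≤ items.length := by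
  intro items
  induction items with
  | nil => intro j; simp [sel]
  | cons x xs ih =>
    intro j
    rw [sel]
    split
    · have := ih (j - 2 ^ xs.length); simp; omega
    · have := ih j; simp; omega

theorem sel_eq_nil_iff : ∀ (items : List Int) (j : Nat), j < 2 ^ items.length →
    (sel items j = [] ↔ j = 0) := by
  intro items
  induction items with
  | nil =>
    intro j hj
    simp only [List.length_nil, pow_zero] at hj
    simp [sel]; omega
  | cons x xs ih =>
    intro j hj
    rw [sel]
    split
    · rename_i hle
      have hpos : 0 < 2 ^ xs.length := by positivity
      constructor
      · intro h; exact absurd h (by simp)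
      · intro h; subst h; exfalso; omega
    · rename_i hle
      exact ih j (by omega)

theorem selC_bits : ∀ (items : List Int) (j : Nat), j < 2 ^ items.length →
    selC (bits items.length j) items = sel items j := by
  intro items
  induction items with
  | nil => intro j hj; rfl
  | cons x xs ih =>
    intro j hj
    simp only [List.length_cons] at hj ⊢
    rw [show bits (xs.length + 1) j =
      (if 2 ^ xs.length ≤ j then '1' else '0') :: bits xs.length (j % 2 ^ xs.length) from rfl]
    rw [sel]
    by_cases hle : 2 ^ xs.length ≤ j
    · have hmod : j % 2 ^ xs.length = j - 2 ^ xs.length := by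
        rw [Nat.mod_eq_sub_mod hle, Nat.mod_eq_of_lt (by
          have := Nat.pow_succ 2 xs.length; omega)]
      rw [if_pos hle, if_pos hle, hmod]
      simp only [selC, List.zip_cons_cons, List.filterMap_cons]
      rw [← ih (j - 2 ^ xs.length) (by have := Nat.pow_succ 2 xs.length; omega)]
      rfl
    · have hmod : j % 2 ^ xs.length = j := Nat.mod_eq_of_lt (by omega)
      rw [if_neg hle, if_neg hle, hmod]
      simp only [selC, List.zip_cons_cons, List.filterMap_cons,
        if_neg (by decide : ¬ ('0' : Char) = '1')]
      exact ih j (by omega)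

theorem count_bits_sel : ∀ (items : List Int) (j : Nat), j < 2 ^ items.length →
    (bits items.length j).count '1' = (sel items j).length := by
  intro items
  induction items with
  | nil => intro j hj; rfl
  | cons x xs ih =>
    intro j hj
    simp only [List.length_cons] at hj ⊢
    rw [show bits (xs.length + 1) j =
      (if 2 ^ xs.length ≤ j then '1' else '0') :: bits xs.length (j % 2 ^ xs.length) from rfl]
    rw [sel]
    by_cases hle : 2 ^ xs.length ≤ j
    · have hmod : j % 2 ^ xs.length = j - 2 ^ xs.length := by
        rw [Nat.mod_eq_sub_mod hle, Nat.mod_eq_of_lt (by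
          have := Nat.pow_succ 2 xs.length; omega)]
      rw [if_pos hle, if_pos hle, hmod]
      rw [List.count_cons]
      rw [ih (j - 2 ^ xs.length) (by have := Nat.pow_succ 2 xs.length; omega)]
      simp
    · have hmod : j % 2 ^ xs.length = j := Nat.mod_eq_of_lt (by omega)
      rw [if_neg hle, if_neg hle, hmod]
      rw [List.count_cons]
      rw [ih j (by omega)]
      simp

theorem foldG : ∀ (xs : List Int) (cs : List Char) (acc : List Int), xs.length ≤ cs.length →
    (List.range xs.length).foldl
      (fun t bit => if cs.getD bit ' ' = '1' then t ++ [xs.getD bit 0] else t) acc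
    = acc ++ selC cs xs := by
  intro xs
  induction xs with
  | nil => intro cs acc h; simp [selC]
  | cons x xt ih =>
    intro cs acc h
    cases cs with
    | nil => simp at h
    | cons c ct =>
      simp only [List.length_cons, List.range_succ_eq_map, List.foldl_cons, List.foldl_map]
      simp only [List.getD_cons_zero, List.getD_cons_succ]
      rw [ih ct _ (by simpa using h)]
      simp only [selC, List.zip_cons_cons, List.filterMap_cons]
      by_cases hc : c = '1'
      · rw [if_pos hc]
        simp [hc]
      · rw [if_neg hc]
        simp [hc]

theorem beq_one_cast (c : Nat) : (((c : Nat) : Int) == (1 : Int)) = (c == 1) := by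
  by_cases h : c = 1
  · subst h; rfl
  · have h2 : ¬((c : Int) = 1) := by exact_mod_cast h
    simp [h, h2]

theorem range_cast (N : Nat) :
    PySem.List.pyRange 0 ((2 : Int) ^ N) 1 = (List.range (2 ^ N)).map (fun (j : Nat) => (j : Int)) := by
  rw [PySem.List.pyRange_one]
  have : ((2 : Int) ^ N - 0) = ((2 ^ N : Nat) : Int) := by push_cast; ring
  rw [this, Int.toNat_natCast]
  simp only [zero_add]

theorem range_cast' (m : Nat) :
    PySem.List.pyRange 0 ((m : Nat) : Int) 1 = (List.range m).map (fun (j : Nat) => (j : Int)) := by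
  rw [PySem.List.pyRange_one]
  have : (((m : Nat) : Int) - 0) = ((m : Nat) : Int) := by ring
  rw [this, Int.toNat_natCast]
  simp only [zero_add]

theorem key_count (l : List Int) (m j : Nat) (hml : m ≤ l.length) (hj : j < 2 ^ m) :
    (binStr j).count '1' = (sel (l.take m) j).length := by
  have hlen : (l.take m).length = m := by rw [List.length_take]; omega
  rcases Nat.eq_zero_or_pos m with hm0 | hm1
  · subst hm0
    have hj0 : j = 0 := by simpa using hj
    subst hj0
    simp [binStr, List.take, sel]
  · have e1 : (binStr j).count '1' = (padBin m j).count '1' := by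
      simp [padBin, List.count_append, List.count_replicate]
    rw [e1, padBin_eq_bits m j hm1 hj]
    have := count_bits_sel (l.take m) j (by rw [hlen]; exact hj)
    rw [hlen] at this
    exact this

theorem key_temp (l : List Int) (m j : Nat) (hml : m ≤ l.length) (hj : j < 2 ^ m) :
    (List.range m).foldl
      (fun t bit => if (padBin m j).getD bit ' ' = '1' then t ++ [l.getD bit 0] else t) []
    = sel (l.take m) j := by
  have hlen : (l.take m).length = m := by rw [List.length_take]; omega
  have hstep : (List.range m).foldl
      (fun t bit => if (padBin m j).getD bit ' ' = '1' then t ++ [l.getD bit 0] else t) []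
    = (List.range m).foldl
      (fun t bit => if (padBin m j).getD bit ' ' = '1' then t ++ [(l.take m).getD bit 0] else t) [] := by
    apply PySem.List.foldl_congr_mem
    intro acc bit hbit
    rw [List.mem_range] at hbit
    have : (l.take m).getD bit 0 = l.getD bit 0 := by
      rw [List.getD_eq_getElem?_getD, List.getD_eq_getElem?_getD,
        List.getElem?_take_of_lt hbit]
    rw [this]
  rw [hstep]
  have hG := foldG (l.take m) (padBin m j) [] (by
    rw [hlen]
    simp only [padBin, List.length_append, List.length_replicate]
    omega)
  rw [hlen] at hG
  rw [hG, List.nil_append]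
  rcases Nat.eq_zero_or_pos m with hm0 | hm1
  · subst hm0
    have hj0 : j = 0 := by simpa using hj
    subst hj0
    simp [selC, sel]
  · rw [padBin_eq_bits m j hm1 hj]
    have := selC_bits (l.take m) j (by rw [hlen]; exact hj)
    rw [hlen] at this
    exact this

theorem A_char (l : List Int) (n k : Int) (h0 : 0 ≤ n) (h1 : n ≤ l.length) :
    check l n k =
      (((List.range (2 ^ n.toNat)).countP
          (fun j => decide ((((sel (l.take n.toNat) j).length : Int) = k ∧
            0 < (sel (l.take n.toNat) j).sum)))) == 1) := by
  have hm : ((n.toNat : Nat) : Int) = n := Int.toNat_of_nonneg h0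
  have hml : n.toNat ≤ l.length := by omega
  simp only [check]
  rw [range_cast]
  simp only [List.foldl_map]
  have hfold : (List.range (2 ^ n.toNat)).foldl
      (fun count j =>
        if ((PySem.Chars.count (PySem.Int.toBinChars ((j : Nat) : Int)) ['1'] : Nat) : Int) ≠ k then count
        else
          if ((PySem.List.pyRange 0 n 1).foldl
              (fun temp bit =>
                if PySem.List.pyGetD
                    (List.replicate ((n - ((PySem.Int.toBinChars ((j : Nat) : Int)).length : Int)).toNat) '0'
                      ++ PySem.Int.toBinChars ((j : Nat) : Int)) bit ' ' = '1'
                then temp ++ [PySem.List.pyGetD l bit 0] else temp) ([] : List Int)).sum > 0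
          then count + 1 else count) (0 : Int)
      = ((List.range (2 ^ n.toNat)).countP
          (fun j => decide ((((sel (l.take n.toNat) j).length : Int) = k ∧
            0 < (sel (l.take n.toNat) j).sum))) : Int) := by
    rw [PySem.List.foldl_congr_mem _ _
      (fun count j => if (((sel (l.take n.toNat) j).length : Int) = k ∧
          0 < (sel (l.take n.toNat) j).sum) then count + 1 else count) 0 ?_]
    · rw [PySem.List.foldl_ite_add_one]
      simp
    · intro acc j hjmem
      rw [List.mem_range] at hjmem
      rw [toBinChars_natCast j, count_one (binStr j), key_count l n.toNat j hml hjmem]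
      have hb2 : List.replicate ((n - ((binStr j).length : Int)).toNat) '0' ++ binStr j
          = padBin n.toNat j := by
        rw [padBin]
        congr 2
        omega
      rw [hb2]
      have htempr : PySem.List.pyRange 0 n 1 = (List.range n.toNat).map (fun (b : Nat) => (b : Int)) := by
        rw [← hm]; exact range_cast' n.toNat
      rw [htempr]
      simp only [List.foldl_map]
      have hinner : (List.range n.toNat).foldl
          (fun temp bit =>
            if PySem.List.pyGetD (padBin n.toNat j) ((bit : Nat) : Int) ' ' = '1'
            then temp ++ [PySem.List.pyGetD l ((bit : Nat) : Int) 0] else temp) ([] : List Int)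
          = sel (l.take n.toNat) j := by
        have := key_temp l n.toNat j hml hjmem
        rw [← this]
        apply PySem.List.foldl_congr_mem
        intro acc' bit _
        rw [PySem.List.pyGetD_natCast, PySem.List.pyGetD_natCast]
      rw [hinner]
      by_cases hk : (((sel (l.take n.toNat) j).length : Int) = k)
      · by_cases hs : (sel (l.take n.toNat) j).sum > 0
        · simp [hk, hs]
        · simp [hk, hs]
      · simp [hk]
  rw [hfold, beq_one_cast]

theorem countP_zero_range : ∀ N : Nat, 0 < N →
    (List.range N).countP (fun j => decide (j = 0)) = 1 := by
  intro N
  induction N with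
  | zero => omega
  | succ N ih =>
    intro _
    rw [List.range_succ, List.countP_append]
    by_cases h : N = 0
    · subst h; rfl
    · rw [ih (by omega)]
      simp [h]

theorem B_char : ∀ (items : List Int) (k s : Int),
    cntAlt items k s =
      ((List.range (2 ^ items.length)).countP
        (fun j => decide ((((sel items j).length : Int) = k ∧ 0 < s + (sel items j).sum)))) := by
  intro items
  induction items with
  | nil =>
    intro k s
    rw [cntAlt]
    simp only [List.length_nil, pow_zero, List.range_one, List.countP_cons, List.countP_nil]
    have hiff : (((sel [] 0).length : Int) = k ∧ 0 < s + (sel [] 0).sum) ↔ (k = 0 ∧ s > 0) := by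
      simp [sel]; omega
    by_cases h : k = 0 ∧ s > 0
    · rw [if_pos h, decide_eq_true (hiff.mpr h)]; rfl
    · rw [if_neg h, decide_eq_false (fun hh => h (hiff.mp hh))]; rfl
  | cons x xs ih =>
    intro k s
    have hL : 0 < 2 ^ xs.length := by positivity
    have hpow : 2 ^ (x :: xs).length = 2 ^ xs.length + 2 ^ xs.length := by
      rw [List.length_cons, pow_succ]; omega
    rw [hpow, List.range_add, List.countP_append, List.countP_map]
    have h1 : (List.range (2 ^ xs.length)).countP
        (fun j => decide ((((sel (x :: xs) j).length : Int) = k ∧ 0 < s + (sel (x :: xs) j).sum)))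
      = (List.range (2 ^ xs.length)).countP
        (fun j => decide ((((sel xs j).length : Int) = k ∧ 0 < s + (sel xs j).sum))) := by
      apply List.countP_congr
      intro j hj
      rw [List.mem_range] at hj
      rw [show sel (x :: xs) j = sel xs j by rw [sel, if_neg (by omega)]]
    have h2 : (List.range (2 ^ xs.length)).countP
        ((fun j => decide ((((sel (x :: xs) j).length : Int) = k ∧ 0 < s + (sel (x :: xs) j).sum)))
          ∘ (fun j => 2 ^ xs.length + j))
      = (List.range (2 ^ xs.length)).countP
        (fun j => decide ((((sel xs j).length : Int) = k - 1 ∧ 0 < (s + x) + (sel xs j).sum))) := by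
      apply List.countP_congr
      intro j hj
      rw [List.mem_range] at hj
      have hsel : sel (x :: xs) (2 ^ xs.length + j) = x :: sel xs j := by
        rw [sel, if_pos (by omega), show 2 ^ xs.length + j - 2 ^ xs.length = j by omega]
      simp only [Function.comp_apply, hsel, List.length_cons, List.sum_cons,
        decide_eq_true_eq]
      push_cast
      constructor
      · rintro ⟨ha, hb⟩; exact ⟨by omega, by omega⟩
      · rintro ⟨ha, hb⟩; exact ⟨by omega, by omega⟩
    rw [h1, h2, cntAlt]
    by_cases hk0 : k ≤ 0
    · rw [if_pos hk0]
      by_cases hk : k = 0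
      · subst hk
        have hcongr : ∀ b ∈ List.range (2 ^ xs.length),
            ((fun j => decide ((((sel xs j).length : Int) = 0 ∧ 0 < s + (sel xs j).sum))) b = true
            ↔ (fun j => decide (b = 0 ∧ 0 < s)) b = true) := by
          intro j hj
          rw [List.mem_range] at hj
          simp only [decide_eq_true_eq]
          constructor
          · rintro ⟨ha, hb⟩
            have hnil : sel xs j = [] := by
              cases hsel : sel xs j with
              | nil => rfl
              | cons a l =>
                exfalso
                rw [hsel] at ha
                simp at ha
                omega
            have hj0 : j = 0 := (sel_eq_nil_iff xs j hj).mp hnil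
            rw [hnil] at hb
            simp at hb
            exact ⟨hj0, hb⟩
          · rintro ⟨rfl, hs⟩
            have hnil : sel xs 0 = [] := (sel_eq_nil_iff xs 0 hj).mpr rfl
            rw [hnil]
            simpa using hs
        have hc2 : (List.range (2 ^ xs.length)).countP
            (fun j => decide ((((sel xs j).length : Int) = 0 - 1 ∧ 0 < (s + x) + (sel xs j).sum))) = 0 := by
          rw [List.countP_eq_zero]
          intro j hj
          simp only [decide_eq_true_eq, not_and]
          intro ha
          omega
        rw [List.countP_congr hcongr, hc2]
        by_cases hs : 0 < s
        · have hcc : ∀ b ∈ List.range (2 ^ xs.length),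
              ((fun j => decide (j = 0 ∧ 0 < s)) b = true ↔ (fun j => decide (j = 0)) b = true) := by
            intro j _
            simp only [decide_eq_true_eq]
            simp [hs]
          rw [List.countP_congr hcc, countP_zero_range _ hL, if_pos ⟨rfl, hs⟩]
          rfl
        · have hcc : ∀ b ∈ List.range (2 ^ xs.length),
              ((fun j => decide (j = 0 ∧ 0 < s)) b = true ↔ (fun _ => false) b = true) := by
            intro j _
            simp [hs]
          rw [List.countP_congr hcc, if_neg (fun hh => hs hh.2)]
          simp
      · rw [if_neg (fun hh => hk hh.1)]
        have hz1 : (List.range (2 ^ xs.length)).countP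
            (fun j => decide ((((sel xs j).length : Int) = k ∧ 0 < s + (sel xs j).sum))) = 0 := by
          rw [List.countP_eq_zero]
          intro j _
          simp only [decide_eq_true_eq, not_and]
          intro ha
          omega
        have hz2 : (List.range (2 ^ xs.length)).countP
            (fun j => decide ((((sel xs j).length : Int) = k - 1 ∧ 0 < (s + x) + (sel xs j).sum))) = 0 := by
          rw [List.countP_eq_zero]
          intro j _
          simp only [decide_eq_true_eq, not_and]
          intro ha
          omega
        rw [hz1, hz2]
        rfl
    · rw [if_neg hk0]
      by_cases hkL : k > (((x :: xs).length : Nat) : Int)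
      · rw [if_pos hkL]
        have hlen : ∀ j : Nat, ((sel xs j).length : Int) ≤ (xs.length : Int) := by
          intro j
          exact_mod_cast sel_length_le xs j
        have hL1 : (((x :: xs).length : Nat) : Int) = (xs.length : Int) + 1 := by
          simp
        have hz1 : (List.range (2 ^ xs.length)).countP
            (fun j => decide ((((sel xs j).length : Int) = k ∧ 0 < s + (sel xs j).sum))) = 0 := by
          rw [List.countP_eq_zero]
          intro j _
          simp only [decide_eq_true_eq, not_and]
          intro ha
          have := hlen j
          omega
        have hz2 : (List.range (2 ^ xs.length)).countP
            (fun j => decide ((((sel xs j).length : Int) = k - 1 ∧ 0 < (s + x) + (sel xs j).sum))) = 0 := by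
          rw [List.countP_eq_zero]
          intro j _
          simp only [decide_eq_true_eq, not_and]
          intro ha
          have := hlen j
          omega
        rw [hz1, hz2]
        rfl
      · rw [if_neg hkL, ih k s, ih (k - 1) (s + x)]
        push_cast
        ring


-- ===== VERDICT (by name: the statement is the Claim_ definition above) =====
theorem check_spec : Claim_equal_check := by
  intro l n k _ hpre
  unfold Pre_check at hpre
  obtain ⟨h0, h1⟩ := hpre
  unfold Spec_check
  rw [A_char l n k h0 h1]
  simp only [check_alt]
  rw [PySem.List.slice_to l h0, B_char (l.take n.toNat) k 0]
  have hlen : (l.take n.toNat).length = n.toNat := by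
    rw [List.length_take]
    omega
  rw [hlen, beq_one_cast]
  congr 1
  apply List.countP_congr
  intro j _
  simp only [decide_eq_true_eq, zero_add]

@[simp] theorem check_raises : Claim_raises_check := by
  unfold Claim_raises_check
  constructor
  · intro l n k _ hr hp
    exact absurd hp (by unfold Pre_check Raises_check at *; omega)
  · exact ⟨by decide, by decide, by decide⟩
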